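-- pv_equiv track=rewrite | github.com/FriendGaru/AoC2020 | day20/20b.py | monsterize_image
-- ===== SOURCE A (Python) =====
-- def monsterize_image(image, monster_coords: set):
--     new_image = []
--     for row in range(len(image)):
--         new_row = ""
--         for col in range(len(image[row])):
--             if (row, col) in monster_coords:
--                 new_row += "O"
--             else:
--                 new_row += image[row][col]
--         new_image.append(new_row)
--     return new_image
-- ===== SOURCE B (Python) =====
-- def monsterize_image(image, monster_coords: set):
--     grid = [list(row) for row in image]
--     for r, c in monster_coords:
--         if 0 <= r < len(grid) and 0 <= c < len(grid[r]):
--             grid[r][c] = "O"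
--     return ["".join(row) for row in grid]
-- ===== Notes on version B (the rewrite author's own statement) =====
-- stated objective: simpler
-- what changed: Instead of scanning every cell and testing set membership, B copies the image into mutable char lists, writes 'O' directly at each in-bounds monster coordinate, and rejoins the rows (sparse overlay instead of dense per-cell rebuild).
import Mathlib
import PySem

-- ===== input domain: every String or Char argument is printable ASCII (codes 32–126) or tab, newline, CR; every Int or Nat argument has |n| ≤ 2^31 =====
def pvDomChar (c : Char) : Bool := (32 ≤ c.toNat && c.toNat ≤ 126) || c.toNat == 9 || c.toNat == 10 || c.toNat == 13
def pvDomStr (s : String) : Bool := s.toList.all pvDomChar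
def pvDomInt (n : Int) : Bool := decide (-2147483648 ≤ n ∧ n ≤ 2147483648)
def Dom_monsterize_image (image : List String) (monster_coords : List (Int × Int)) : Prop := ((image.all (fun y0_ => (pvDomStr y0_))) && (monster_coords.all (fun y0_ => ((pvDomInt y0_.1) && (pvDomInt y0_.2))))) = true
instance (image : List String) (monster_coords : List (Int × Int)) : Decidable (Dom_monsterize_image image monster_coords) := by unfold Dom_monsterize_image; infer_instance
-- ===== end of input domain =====

-- B overlays the sparse monster coordinates onto a mutable copy of the image instead of
-- scanning every cell with a membership test; objective: simpler (return value only).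

-- ===== PORT A =====
-- dense scan: for each row, rebuild the row char by char, testing set membership at each cell
-- (string concatenation is ported on the character list, String.ofList at the end; exact for these strings)
def monsterize_image (image : List String) (monster_coords : List (Int × Int)) : List String :=
  (List.range image.length).foldl (fun new_image row =>
    let rowChars := (image.getD row "").toList
    let new_row := (List.range rowChars.length).foldl (fun nr (col : Nat) =>
      nr ++ [if monster_coords.contains ((row : Int), (col : Int)) then 'O' else rowChars.getD col ' ']) ([] : List Char)
    new_image ++ [String.ofList new_row]) []

-- ===== PORT B =====
-- write 'O' at one coordinate if it is in bounds (B's loop body)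
def pvMark (g : List (List Char)) (rc : Int × Int) : List (List Char) :=
  if 0 ≤ rc.1 ∧ rc.1 < (g.length : Int) ∧ 0 ≤ rc.2 ∧ rc.2 < ((g.getD rc.1.toNat []).length : Int) then
    g.set rc.1.toNat ((g.getD rc.1.toNat []).set rc.2.toNat 'O')
  else g

def monsterize_image_alt (image : List String) (monster_coords : List (Int × Int)) : List String :=
  (monster_coords.foldl pvMark (image.map String.toList)).map (fun row => String.ofList row)

-- ===== PRECONDITION & SPEC =====
def Spec_monsterize_image (image : List String) (monster_coords : List (Int × Int)) (out : List String) : Prop := out = monsterize_image_alt image monster_coords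
instance (image : List String) (monster_coords : List (Int × Int)) (out : List String) : Decidable (Spec_monsterize_image image monster_coords out) := by unfold Spec_monsterize_image; infer_instance

-- ===== CLAIM (what is proved, stated in full; the proofs are below) =====
def Claim_equal_monsterize_image : Prop := ∀ (image : List String) (monster_coords : List (Int × Int)), Dom_monsterize_image image monster_coords → Spec_monsterize_image image monster_coords (monsterize_image image monster_coords)

-- ===== LEMMAS AND PROOFS =====

theorem pv_foldl_range_append {α : Type} (f : Nat → α) :
    ∀ (n : Nat) (acc : List α),
      (List.range n).foldl (fun l i => l ++ [f i]) acc = acc ++ (List.range n).map f := by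
  intro n
  induction n with
  | zero => intro acc; simp
  | succ m ih =>
    intro acc
    simp [List.range_succ, List.foldl_append, ih]

theorem pvMark_length (g : List (List Char)) (p : Int × Int) :
    (pvMark g p).length = g.length := by
  unfold pvMark; split <;> simp

theorem pvMark_row_length (g : List (List Char)) (p : Int × Int) (i : Nat) :
    ((pvMark g p).getD i []).length = (g.getD i []).length := by
  unfold pvMark
  split
  · rename_i h
    by_cases hi : p.1.toNat = i
    · subst hi
      have hlt : p.1.toNat < g.length := by omega
      simp [List.getD_eq_getElem?_getD, hlt]
    · simp [List.getD_eq_getElem?_getD, List.getElem?_set_ne hi]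
  · rfl

theorem pvFold_length (mc : List (Int × Int)) :
    ∀ g : List (List Char), (mc.foldl pvMark g).length = g.length := by
  induction mc with
  | nil => intro g; rfl
  | cons p t ih => intro g; simpa [List.foldl_cons, pvMark_length] using ih (pvMark g p)

theorem pvFold_row_length (mc : List (Int × Int)) :
    ∀ (g : List (List Char)) (i : Nat),
      ((mc.foldl pvMark g).getD i []).length = (g.getD i []).length := by
  induction mc with
  | nil => intro g i; rfl
  | cons p t ih =>
    intro g i
    rw [List.foldl_cons, ih (pvMark g p) i, pvMark_row_length]

-- cell characterisation of B's fold: every in-bounds cell hit by a coordinate becomes 'O'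
theorem pvFold_cell (mc : List (Int × Int)) :
    ∀ (g : List (List Char)) (i c : Nat), i < g.length → c < (g.getD i []).length →
      ((mc.foldl pvMark g).getD i []).getD c ' ' =
        if mc.contains ((i : Int), (c : Int)) then 'O' else (g.getD i []).getD c ' ' := by
  induction mc with
  | nil => intro g i c _ _; simp
  | cons p t ih =>
    intro g i c hi hc
    have hi' : i < (pvMark g p).length := by rw [pvMark_length]; exact hi
    have hc' : c < ((pvMark g p).getD i []).length := by rw [pvMark_row_length]; exact hc
    rw [List.foldl_cons, ih (pvMark g p) i c hi' hc']
    by_cases ht : ((i : Int), (c : Int)) ∈ t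
    · simp [ht]
    · have ht' : t.contains ((i : Int), (c : Int)) = false := by simpa using ht
      simp only [ht', Bool.false_eq_true, if_false, List.contains_cons, Bool.or_false]
      by_cases hp : p = ((i : Int), (c : Int))
      · subst hp
        simp only [beq_self_eq_true, if_true]
        have hcond : 0 ≤ (i : Int) ∧ (i : Int) < (g.length : Int) ∧ 0 ≤ (c : Int) ∧
            (c : Int) < (((g.getD ((i : Int)).toNat []).length : Int)) := by
          refine ⟨Int.natCast_nonneg i, by exact_mod_cast hi, Int.natCast_nonneg c, ?_⟩
          simp only [Int.toNat_natCast]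
          exact_mod_cast hc
        unfold pvMark
        rw [if_pos hcond]
        simp only [Int.toNat_natCast]
        have hcl : c < (g[i]?.getD []).length := by
          simpa [List.getD_eq_getElem?_getD] using hc
        simp only [List.getD_eq_getElem?_getD,
          List.getElem?_set_self (show i < g.length from hi), Option.getD_some]
        rw [List.getElem?_set_self hcl]
        rfl
      · have hbeq : ((((i : Int), (c : Int)) : Int × Int) == p) = false := by
          simpa using Ne.symm hp
        simp only [hbeq, Bool.false_eq_true, if_false]
        -- pvMark at a different coordinate leaves cell (i,c) unchanged
        unfold pvMark
        split
        · rename_i hcond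
          by_cases hr : p.1.toNat = i
          · have hp1 : p.1 = (i : Int) := by omega
            have hp2 : p.2 ≠ (c : Int) := by
              intro h2; exact hp (by cases p; simp_all)
            have hc2 : p.2.toNat ≠ c := by omega
            simp only [List.getD_eq_getElem?_getD, hr]
            rw [List.getElem?_set_self (by simpa using hi)]
            simp [List.getElem?_set_ne hc2]
          · simp only [List.getD_eq_getElem?_getD]
            rw [List.getElem?_set_ne hr]
        · rfl

theorem monsterize_row (image : List String) (mc : List (Int × Int)) (i : Nat)
    (hi : i < image.length) :
    (List.range (image.getD i "").toList.length).map
        (fun (col : Nat) => if mc.contains ((i : Int), (col : Int)) then 'O'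
          else (image.getD i "").toList.getD col ' ') =
      (mc.foldl pvMark (image.map String.toList)).getD i [] := by
  have hrow : (image.map String.toList).getD i [] = (image.getD i "").toList := by
    rw [List.getD_eq_getElem?_getD, List.getElem?_map, List.getD_eq_getElem?_getD,
      List.getElem?_eq_getElem hi]
    rfl
  have hlen : ((mc.foldl pvMark (image.map String.toList)).getD i []).length
      = (image.getD i "").toList.length := by
    rw [pvFold_row_length, hrow]
  apply List.ext_getElem
  · simpa using hlen.symm
  · intro c h1 h2
    have hc : c < (image.getD i "").toList.length := by simpa using h1
    have hcell := pvFold_cell mc (image.map String.toList) i c (by simpa using hi)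
      (by rw [hrow]; exact hc)
    rw [hrow] at hcell
    calc ((List.range (image.getD i "").toList.length).map
            (fun (col : Nat) => if mc.contains ((i : Int), (col : Int)) then 'O'
              else (image.getD i "").toList.getD col ' '))[c]
        = if mc.contains ((i : Int), (c : Int)) then 'O'
            else (image.getD i "").toList.getD c ' ' := by
          simp
      _ = ((mc.foldl pvMark (image.map String.toList)).getD i []).getD c ' ' := hcell.symm
      _ = ((mc.foldl pvMark (image.map String.toList)).getD i [])[c] :=
          List.getD_eq_getElem _ ' ' (by omega)

-- ===== VERDICT (by name: the statement is the Claim_ definition above) =====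
theorem monsterize_image_spec : Claim_equal_monsterize_image := by
  intro image mc _
  unfold Spec_monsterize_image monsterize_image monsterize_image_alt
  rw [pv_foldl_range_append]
  simp only [List.nil_append]
  apply List.ext_getElem
  · simp [pvFold_length]
  · intro i h1 h2
    have hi : i < image.length := by simpa using h1
    simp only [List.getElem_map, List.getElem_range]
    rw [pv_foldl_range_append, List.nil_append]
    congr 1
    have := monsterize_row image mc i hi
    rw [this]
    exact List.getD_eq_getElem _ [] (by rw [pvFold_length]; simpa using hi)
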